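-- pv_equiv track=rewrite | github.com/yqy2026/zcgl | backend/tests/unit/migration/test_policy_package_seed_actions.py | _resource_actions_for_policy
-- ===== SOURCE A (Python) =====
-- def _resource_actions_for_policy(
--     policy_seeds: list[dict[str, object]],
--     policy_name: str,
-- ) -> dict[str, set[str]]:
--     coverage: dict[str, set[str]] = {}
--     for seed in policy_seeds:
--         if str(seed["name"]) != policy_name:
--             continue
--         resource = str(seed["resource_type"])
--         action = str(seed["action"])
--         coverage.setdefault(resource, set()).add(action)
--     return coverage
-- ===== SOURCE B (Python) =====
-- def _resource_actions_for_policy(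
--     policy_seeds: list[dict[str, object]],
--     policy_name: str,
-- ) -> dict[str, set[str]]:
--     matched = [
--         (str(seed["resource_type"]), str(seed["action"]))
--         for seed in policy_seeds
--         if str(seed["name"]) == policy_name
--     ]
--     return {
--         resource: {action for res, action in matched if res == resource}
--         for resource in dict.fromkeys(res for res, _ in matched)
--     }
-- ===== Notes on version B (the rewrite author's own statement) =====
-- stated objective: alternative
-- what changed: Replaces the single incremental pass that grows a dict of sets with setdefault by a two-phase pipeline: a comprehension first filters the matching seeds into (resource, action) pairs, then a dict/set comprehension over the order-deduplicated resource list builds each action set by scanning those pairs.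
import Mathlib
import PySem

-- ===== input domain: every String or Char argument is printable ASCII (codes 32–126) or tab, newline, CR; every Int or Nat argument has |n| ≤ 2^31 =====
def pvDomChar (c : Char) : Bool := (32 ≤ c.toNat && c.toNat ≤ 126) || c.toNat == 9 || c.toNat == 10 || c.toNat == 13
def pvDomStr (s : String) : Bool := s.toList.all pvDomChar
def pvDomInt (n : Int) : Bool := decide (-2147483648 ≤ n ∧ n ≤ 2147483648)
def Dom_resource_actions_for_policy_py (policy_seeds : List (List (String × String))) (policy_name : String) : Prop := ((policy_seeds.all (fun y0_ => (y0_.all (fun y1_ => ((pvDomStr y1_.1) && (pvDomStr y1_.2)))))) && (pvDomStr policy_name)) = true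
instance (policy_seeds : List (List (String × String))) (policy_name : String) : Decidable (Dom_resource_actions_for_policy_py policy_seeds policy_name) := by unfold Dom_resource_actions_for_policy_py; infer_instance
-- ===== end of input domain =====

-- B replaces A's single setdefault-accumulation pass by filter-to-pairs, then a grouped
-- dedup-keys/per-key-scan construction; same cost class, alternative decomposition.

-- seed[k]: Python dict lookup; the `none` (KeyError) case is excluded by Pre_ below,
-- so the "" default is never reached on admitted inputs.
def pvSGet (seed : List (String × String)) (k : String) : String :=
  (PySem.Dict.mk seed).getD k ""

-- ===== PORT A =====
def resource_actions_for_policy_py (policy_seeds : List (List (String × String))) (policy_name : String) : List (String × List String) :=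
  (policy_seeds.foldl
    (fun (coverage : PySem.Dict String (List String)) seed =>
      if pvSGet seed "name" ≠ policy_name then coverage
      else
        let resource := pvSGet seed "resource_type"
        let action := pvSGet seed "action"
        -- coverage.setdefault(resource, set()).add(action)  =  coverage[resource] = coverage.get(resource, set()) ∪ {action}
        coverage.modify resource [] (fun s => PySem.Set.add s action))
    PySem.Dict.empty).items

-- ===== PORT B =====
def resource_actions_for_policy_py_alt (policy_seeds : List (List (String × String))) (policy_name : String) : List (String × List String) :=
  let matched :=
    (policy_seeds.filter (fun seed => pvSGet seed "name" == policy_name)).map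
      (fun seed => (pvSGet seed "resource_type", pvSGet seed "action"))
  (PySem.List.dedup (matched.map Prod.fst)).map
    (fun resource =>
      (resource, PySem.Set.ofList ((matched.filter (fun p => p.1 == resource)).map Prod.snd)))

-- ===== PRECONDITION & SPEC =====
-- Pre_ excludes exactly the inputs where the Python raises KeyError: a seed without "name",
-- or a seed matching policy_name without "resource_type" or "action".
def Pre_resource_actions_for_policy_py (policy_seeds : List (List (String × String))) (policy_name : String) : Prop :=
  ∀ seed ∈ policy_seeds,
    (PySem.Dict.mk seed).contains "name" = true ∧
    ((PySem.Dict.mk seed).getD "name" "" = policy_name →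
      (PySem.Dict.mk seed).contains "resource_type" = true ∧
      (PySem.Dict.mk seed).contains "action" = true)
instance (policy_seeds : List (List (String × String))) (policy_name : String) : Decidable (Pre_resource_actions_for_policy_py policy_seeds policy_name) := by unfold Pre_resource_actions_for_policy_py; infer_instance

def pvWitness_resource_actions_for_policy_py : (List (List (String × String))) × String :=
  ([[("name", "p"), ("resource_type", "r"), ("action", "a")],
    [("name", "q"), ("resource_type", "r"), ("action", "b")],
    [("name", "p"), ("resource_type", "r"), ("action", "c")]], "p")

def Spec_resource_actions_for_policy_py (policy_seeds : List (List (String × String))) (policy_name : String) (out : List (String × List String)) : Prop := out = resource_actions_for_policy_py_alt policy_seeds policy_name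
instance (policy_seeds : List (List (String × String))) (policy_name : String) (out : List (String × List String)) : Decidable (Spec_resource_actions_for_policy_py policy_seeds policy_name out) := by unfold Spec_resource_actions_for_policy_py; infer_instance

-- ===== CLAIM (what is proved, stated in full; the proofs are below) =====
def Claim_equal_resource_actions_for_policy_py : Prop := ∀ (policy_seeds : List (List (String × String))) (policy_name : String), Dom_resource_actions_for_policy_py policy_seeds policy_name → Pre_resource_actions_for_policy_py policy_seeds policy_name → Spec_resource_actions_for_policy_py policy_seeds policy_name (resource_actions_for_policy_py policy_seeds policy_name)

-- ===== LEMMAS AND PROOFS =====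

-- A's loop body on a (resource, action) pair.
def pvStep (d : PySem.Dict String (List String)) (p : String × String) : PySem.Dict String (List String) :=
  d.modify p.1 [] (fun s => PySem.Set.add s p.2)

lemma pvStep_getD (ps : List (String × String)) (d : PySem.Dict String (List String)) (r : String) :
    (ps.foldl pvStep d).getD r [] =
      ((ps.filter (fun p => p.1 == r)).map Prod.snd).foldl PySem.Set.add (d.getD r []) := by
  induction ps generalizing d with
  | nil => rfl
  | cons p ps ih =>
    simp only [List.foldl_cons, ih, List.filter_cons]
    by_cases h : r = p.1
    · simp [pvStep, h]
    · have hb : (p.1 == r) = false := by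
        by_cases e : p.1 = r
        · exact absurd e.symm h
        · simp [e]
      simp [pvStep, PySem.Dict.getD_modify, h, hb]

lemma pvStep_items (ps : List (String × String)) :
    (ps.foldl pvStep PySem.Dict.empty).items =
      (PySem.List.dedup (ps.map Prod.fst)).map
        (fun r => (r, PySem.Set.ofList ((ps.filter (fun p => p.1 == r)).map Prod.snd))) := by
  have hnd : (ps.foldl pvStep PySem.Dict.empty).keys.Nodup := by
    have := PySem.Dict.nodup_keys_foldl_modify_key (l := ps) (key := Prod.fst)
      (d0 := ([] : List String)) (f := fun _ p => fun s => PySem.Set.add s p.2)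
      (d := PySem.Dict.empty) (by simp)
    simpa [pvStep] using this
  have hkeys : (ps.foldl pvStep PySem.Dict.empty).keys = PySem.List.dedup (ps.map Prod.fst) := by
    have := PySem.Dict.keys_foldl_modify_key (l := ps) (key := Prod.fst)
      (d0 := ([] : List String)) (f := fun _ p => fun s => PySem.Set.add s p.2)
      (d := PySem.Dict.empty)
    simpa [pvStep, PySem.Set.update, PySem.List.dedup_eq_ofList, PySem.Set.ofList_eq_foldl] using this
  rw [PySem.Dict.items_eq_map_keys _ hnd ([] : List String), hkeys]
  refine List.map_congr_left (fun r _ => ?_)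
  rw [pvStep_getD]
  simp [PySem.Set.ofList_eq_foldl, PySem.Dict.getD_empty]

-- ===== VERDICT (by name: the statement is the Claim_ definition above) =====
theorem resource_actions_for_policy_py_spec : Claim_equal_resource_actions_for_policy_py := by
  intro policy_seeds policy_name _ _
  unfold Spec_resource_actions_for_policy_py
  unfold resource_actions_for_policy_py resource_actions_for_policy_py_alt
  simp only [ne_eq, ite_not]
  rw [PySem.List.foldl_ite_eq_foldl_filter
      (p := fun seed => pvSGet seed "name" = policy_name)
      (f := fun (coverage : PySem.Dict String (List String)) seed =>
        coverage.modify (pvSGet seed "resource_type") [] (fun s => PySem.Set.add s (pvSGet seed "action")))]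
  have hfilt : (policy_seeds.filter (fun seed => decide (pvSGet seed "name" = policy_name)))
      = policy_seeds.filter (fun seed => pvSGet seed "name" == policy_name) := by
    apply List.filter_congr
    intro seed _
    by_cases h : pvSGet seed "name" = policy_name <;> simp [h]
  rw [hfilt]
  have hm := pvStep_items ((policy_seeds.filter
      (fun seed => pvSGet seed "name" == policy_name)).map
      (fun seed => (pvSGet seed "resource_type", pvSGet seed "action")))
  rw [List.foldl_map] at hm
  simpa [pvStep] using hm
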